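-- pv_equiv track=rewrite | github.com/isegura/OCWEDA2022 | TEMA7/tema7_problemas.py | findLowestEvenOdd
-- ===== SOURCE A (Python) =====
-- def findLowestEvenOdd(A):
--     """returns the lowest even and lowest odd"""
--     if A is None or len(A) == 0:
--         return None, None
--
--     if len(A) == 1:
--         if A[0] % 2 == 0:
--             return A[0], None
--         else:
--             return None, A[0]
--
--     m = len(A) // 2
--     part1 = A[0:m]
--     part2 = A[m:]
--
--     even1, odd1 = findLowestEvenOdd(part1)
--     even2, odd2 = findLowestEvenOdd(part2)
--
--     if even1 is not None and even2 is not None: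
--         even = min(even1, even2)
--     elif even1 is not None:
--         even = even1
--     else:
--         even = even2
--
--     if odd1 is not None and odd2 is not None:
--         odd = min(odd1, odd2)
--     elif odd1 is not None:
--         odd = odd1
--     else:
--         odd = odd2
--
--     return even, odd
-- ===== SOURCE B (Python) =====
-- def findLowestEvenOdd(A):
--     """returns the lowest even and lowest odd"""
--     if A is None:
--         return None, None
--     even = None
--     odd = None
--     for x in A:
--         if x % 2 == 0:
--             if even is None or x < even:
--                 even = x
--         else:
--             if odd is None or x < odd:
--                 odd = x
--     return even, odd
-- ===== Notes on version B (the rewrite author's own statement) =====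
-- stated objective: faster
-- what changed: Replaced the recursive divide-and-conquer (which slices the list in halves and merges optional minima) by a single left-to-right pass maintaining the current minimum even and minimum odd.
import Mathlib
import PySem

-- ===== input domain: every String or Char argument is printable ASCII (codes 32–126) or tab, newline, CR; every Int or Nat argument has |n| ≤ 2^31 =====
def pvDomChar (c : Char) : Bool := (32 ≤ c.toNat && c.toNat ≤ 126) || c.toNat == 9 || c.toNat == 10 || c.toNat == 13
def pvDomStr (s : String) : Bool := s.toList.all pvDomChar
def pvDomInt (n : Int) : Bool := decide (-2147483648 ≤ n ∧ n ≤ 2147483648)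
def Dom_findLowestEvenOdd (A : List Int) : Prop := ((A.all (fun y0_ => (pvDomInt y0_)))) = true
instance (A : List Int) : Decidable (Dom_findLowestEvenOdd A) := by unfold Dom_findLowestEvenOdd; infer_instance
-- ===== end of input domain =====

/- B replaces A's divide-and-conquer by a single linear pass tracking the minimum even and minimum odd (objective: faster). -/

-- ===== PORT A =====
def findLowestEvenOdd (A : List Int) : Option Int × Option Int :=
  if _h0 : A.length = 0 then (none, none)
  else if _h1 : A.length = 1 then
    (if PySem.Int.mod A.headI 2 = 0 then (some A.headI, none) else (none, some A.headI))
  else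
    -- Python 'len(A) // 2': both operands are nonnegative, so Nat division is exact here
    let m : Nat := A.length / 2
    let part1 := PySem.List.slice A (some 0) (some (m : Int))
    let part2 := PySem.List.slice A (some (m : Int)) none
    let r1 := findLowestEvenOdd part1
    let r2 := findLowestEvenOdd part2
    let even := match r1.1, r2.1 with
      | some e1, some e2 => some (min e1 e2)
      | some e1, none => some e1
      | none, e2 => e2
    let odd := match r1.2, r2.2 with
      | some o1, some o2 => some (min o1 o2)
      | some o1, none => some o1
      | none, o2 => o2
    (even, odd)
termination_by A.length
decreasing_by
  · simp only [PySem.List.slice_zero_start, PySem.List.slice_to_natCast, List.length_take]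
    omega
  · simp only [PySem.List.slice_from_natCast, List.length_drop]
    omega

-- ===== PORT B =====
-- B-side helper: one step of the linear scan
def pvStep (acc : Option Int × Option Int) (x : Int) : Option Int × Option Int :=
  if PySem.Int.mod x 2 = 0 then
    match acc.1 with
    | none => (some x, acc.2)
    | some e => if x < e then (some x, acc.2) else acc
  else
    match acc.2 with
    | none => (acc.1, some x)
    | some o => if x < o then (acc.1, some x) else acc

def findLowestEvenOdd_alt (A : List Int) : Option Int × Option Int :=
  A.foldl pvStep (none, none)

-- ===== PRECONDITION & SPEC =====
def Spec_findLowestEvenOdd (A : List Int) (out : Option Int × Option Int) : Prop := out = findLowestEvenOdd_alt A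
instance (A : List Int) (out : Option Int × Option Int) : Decidable (Spec_findLowestEvenOdd A out) := by unfold Spec_findLowestEvenOdd; infer_instance

-- ===== CLAIM (what is proved, stated in full; the proofs are below) =====
def Claim_equal_findLowestEvenOdd : Prop := ∀ (A : List Int), Dom_findLowestEvenOdd A → Spec_findLowestEvenOdd A (findLowestEvenOdd A)

-- ===== LEMMAS AND PROOFS =====
-- merge of two optional minima, exactly A's None-aware min
def pvOmin (a b : Option Int) : Option Int :=
  match a, b with
  | some x, some y => some (min x y)
  | some x, none => some x
  | none, y => y

theorem pvOmin_none_right (a : Option Int) : pvOmin a none = a := by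
  cases a <;> rfl

theorem pvOmin_assoc (a b c : Option Int) : pvOmin (pvOmin a b) c = pvOmin a (pvOmin b c) := by
  cases a <;> cases b <;> cases c <;> simp [pvOmin, min_assoc]

theorem pvStep_eq (acc : Option Int × Option Int) (x : Int) :
    pvStep acc x = (pvOmin acc.1 (pvStep (none, none) x).1, pvOmin acc.2 (pvStep (none, none) x).2) := by
  obtain ⟨a, b⟩ := acc
  simp only [pvStep]
  split_ifs with h
  · cases a <;> cases b <;> simp [pvOmin] <;> split_ifs with h2 <;> simp_all [min_def]
  · cases a <;> cases b <;> simp [pvOmin] <;> split_ifs with h2 <;> simp_all [min_def]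

theorem foldl_pvStep_acc (l : List Int) : ∀ acc : Option Int × Option Int,
    l.foldl pvStep acc =
      (pvOmin acc.1 (l.foldl pvStep (none, none)).1, pvOmin acc.2 (l.foldl pvStep (none, none)).2) := by
  induction l with
  | nil => intro acc; simp [pvOmin_none_right]
  | cons x l ih =>
    intro acc
    simp only [List.foldl_cons]
    rw [ih (pvStep acc x), ih (pvStep (none, none) x)]
    rw [pvStep_eq acc x]
    simp [pvOmin_assoc]

theorem alt_append (l1 l2 : List Int) :
    findLowestEvenOdd_alt (l1 ++ l2) =
      (pvOmin (findLowestEvenOdd_alt l1).1 (findLowestEvenOdd_alt l2).1,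
       pvOmin (findLowestEvenOdd_alt l1).2 (findLowestEvenOdd_alt l2).2) := by
  simp only [findLowestEvenOdd_alt, List.foldl_append]
  exact foldl_pvStep_acc l2 _

theorem findLowestEvenOdd_rec (A : List Int) (h0 : ¬ A.length = 0) (h1 : ¬ A.length = 1) :
    findLowestEvenOdd A =
      (pvOmin (findLowestEvenOdd (PySem.List.slice A (some 0) (some ((A.length / 2 : Nat) : Int)))).1
              (findLowestEvenOdd (PySem.List.slice A (some ((A.length / 2 : Nat) : Int)) none)).1,
       pvOmin (findLowestEvenOdd (PySem.List.slice A (some 0) (some ((A.length / 2 : Nat) : Int)))).2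
              (findLowestEvenOdd (PySem.List.slice A (some ((A.length / 2 : Nat) : Int)) none)).2) := by
  rw [findLowestEvenOdd]
  rw [dif_neg h0, dif_neg h1]
  simp only []
  cases hr1 : findLowestEvenOdd (PySem.List.slice A (some 0) (some ((A.length / 2 : Nat) : Int))) with
  | mk e1 o1 =>
    cases hr2 : findLowestEvenOdd (PySem.List.slice A (some ((A.length / 2 : Nat) : Int)) none) with
    | mk e2 o2 =>
      cases e1 <;> cases e2 <;> cases o1 <;> cases o2 <;> rfl

theorem main_eq (A : List Int) : findLowestEvenOdd A = findLowestEvenOdd_alt A := by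
  induction A using findLowestEvenOdd.induct with
  | case1 A h0 =>
    rw [findLowestEvenOdd]
    simp [List.length_eq_zero_iff.mp h0, findLowestEvenOdd_alt]
  | case2 A h0 h1 h2 =>
    obtain ⟨x, hx⟩ := List.length_eq_one_iff.mp h1
    subst hx
    rw [findLowestEvenOdd]
    simp_all [findLowestEvenOdd_alt, pvStep, List.headI]
  | case3 A h0 h1 h2 =>
    obtain ⟨x, hx⟩ := List.length_eq_one_iff.mp h1
    subst hx
    rw [findLowestEvenOdd]
    simp_all [findLowestEvenOdd_alt, pvStep, List.headI]
  | case4 A h0 h1 m part1 part2 ih1 ih2 =>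
    simp only [part2, part1, m] at ih1 ih2
    have hsplit : PySem.List.slice A (some 0) (some ((A.length / 2 : Nat) : Int)) ++
        PySem.List.slice A (some ((A.length / 2 : Nat) : Int)) none = A := by
      simp only [PySem.List.slice_zero_start, PySem.List.slice_to_natCast,
        PySem.List.slice_from_natCast]
      exact List.take_append_drop _ _
    rw [findLowestEvenOdd_rec A h0 h1, ih1, ih2]
    conv_rhs => rw [← hsplit]
    rw [alt_append]

-- ===== VERDICT (by name: the statement is the Claim_ definition above) =====
theorem findLowestEvenOdd_spec : Claim_equal_findLowestEvenOdd := by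
  intro A _
  exact main_eq A
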